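-- pv_equiv track=rewrite | github.com/kategerasimenko/diacritics-site | site/app/diacritics_restoration.py | insert_dia
-- ===== SOURCE A (Python) =====
-- def insert_dia(text,dias,no_dias):
--     var = ['']
--     for i in text:
--         if i in no_dias:
--             var = var * 2
--             for j in range(len(var)):
--                 if j+1 > (len(var) / 2):
--                     var[j] += dias[no_dias.index(i)]
--                 else:
--                     var[j] += i
--         else:
--             var = list(map(lambda x: x + i,var))
--     return var
-- ===== SOURCE B (Python) =====
-- def insert_dia(text, dias, no_dias):
--     k = sum(1 for c in text if c in no_dias)
--     result = []
--     for mask in range(1 << k):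
--         parts = []
--         d = 0
--         for c in text:
--             if c in no_dias:
--                 parts.append(dias[no_dias.index(c)] if (mask >> d) & 1 else c)
--                 d += 1
--             else:
--                 parts.append(c)
--         result.append(''.join(parts))
--     return result
-- ===== Notes on version B (the rewrite author's own statement) =====
-- stated objective: alternative
-- what changed: B counts the diacritic characters k once and generates each of the 2^k variants independently from a bitmask (bit d of the mask decides whether the d-th diacritic char is accented), instead of A's growing a list by doubling it at every diacritic char.
-- outside the precondition, e.g. on insert_dia('a', [], ['a']): A raises IndexError, B raises IndexError
import Mathlib
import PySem

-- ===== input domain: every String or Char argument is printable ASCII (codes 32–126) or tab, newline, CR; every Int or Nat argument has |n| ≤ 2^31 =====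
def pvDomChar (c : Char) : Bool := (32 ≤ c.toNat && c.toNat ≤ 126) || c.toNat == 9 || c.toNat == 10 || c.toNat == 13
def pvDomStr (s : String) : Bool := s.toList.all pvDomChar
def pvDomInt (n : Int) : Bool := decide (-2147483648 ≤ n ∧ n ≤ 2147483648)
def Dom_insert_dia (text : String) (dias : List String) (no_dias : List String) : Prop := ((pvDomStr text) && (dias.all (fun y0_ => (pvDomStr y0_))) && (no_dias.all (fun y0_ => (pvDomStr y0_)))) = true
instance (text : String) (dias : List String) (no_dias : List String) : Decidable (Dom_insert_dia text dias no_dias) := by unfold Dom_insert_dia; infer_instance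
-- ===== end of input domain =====

-- B enumerates the 2^k diacritic-placement variants by bitmask instead of A's incremental list doubling; same outputs, same order.

-- shared lookup `dias[no_dias.index(c)]`; Pre_ excludes the out-of-range case (Python IndexError), so `.getD ""` is never reached there
def lookupDia (dias : List String) (no_dias : List String) (s : String) : String :=
  match PySem.List.index? no_dias s with
  | some j => (dias[j]?).getD ""
  | none => ""

-- ===== PORT A =====
-- loop body of A: double the variant list on a diacritic char, appending the plain char on the
-- first half and the accented one on the second; `j+1 > len(var)/2` (Python true division, len
-- always even here) is ported as the exact integer test `2*(j+1) > len(var)`.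
def aStep (dias : List String) (no_dias : List String) (var : List String) (i : Char) : List String :=
  let si := String.ofList [i]
  if no_dias.contains si then
    let var2 := var ++ var
    var2.mapIdx (fun j x =>
      if 2 * (j + 1) > var2.length then x ++ lookupDia dias no_dias si else x ++ si)
  else
    var.map (fun x => x ++ si)

def insert_dia (text : String) (dias : List String) (no_dias : List String) : List String :=
  text.toList.foldl (aStep dias no_dias) [""]

-- ===== PORT B =====
-- inner pass of Source B: extend one variant by char `c`; the bit `d` of `mask` decides whether the
-- d-th diacritic char is accented (''.join of appended parts is ported as string concatenation)
def bStep (dias : List String) (no_dias : List String) (mask : Nat) (st : String × Nat) (c : Char) : String × Nat :=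
  let sc := String.ofList [c]
  if no_dias.contains sc then
    (st.1 ++ (if mask.testBit st.2 then lookupDia dias no_dias sc else sc), st.2 + 1)
  else
    (st.1 ++ sc, st.2)

def buildVariant (dias : List String) (no_dias : List String) (cs : List Char) (mask : Nat) (st : String × Nat) : String × Nat :=
  cs.foldl (bStep dias no_dias mask) st

def insert_dia_alt (text : String) (dias : List String) (no_dias : List String) : List String :=
  let k := (text.toList.filter (fun c => no_dias.contains (String.ofList [c]))).length
  (List.range (2 ^ k)).map (fun mask => (buildVariant dias no_dias text.toList mask ("", 0)).1)

-- ===== PRECONDITION & SPEC =====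
-- Pre_ excludes exactly the inputs where A raises IndexError: a diacritic char of text whose
-- first index in no_dias is out of range for dias.
def Pre_insert_dia (text : String) (dias : List String) (no_dias : List String) : Prop :=
  (text.toList.all (fun c =>
    match PySem.List.index? no_dias (String.ofList [c]) with
    | some j => decide (j < dias.length)
    | none => true)) = true
instance (text : String) (dias : List String) (no_dias : List String) : Decidable (Pre_insert_dia text dias no_dias) := by unfold Pre_insert_dia; infer_instance

def pvWitness_insert_dia : String × List String × List String := ("cab", ["A!"], ["a"])

def Spec_insert_dia (text : String) (dias : List String) (no_dias : List String) (out : List String) : Prop := out = insert_dia_alt text dias no_dias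
instance (text : String) (dias : List String) (no_dias : List String) (out : List String) : Decidable (Spec_insert_dia text dias no_dias out) := by unfold Spec_insert_dia; infer_instance

-- ===== CLAIM (what is proved, stated in full; the proofs are below) =====
def Claim_equal_insert_dia : Prop := ∀ (text : String) (dias : List String) (no_dias : List String), Dom_insert_dia text dias no_dias → Pre_insert_dia text dias no_dias → Spec_insert_dia text dias no_dias (insert_dia text dias no_dias)

-- ===== LEMMAS AND PROOFS =====

-- the counter component of B's inner fold just counts diacritic chars, independently of the mask
theorem buildVariant_snd (dias no_dias : List String) (cs : List Char) (mask : Nat) :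
    ∀ s d, (buildVariant dias no_dias cs mask (s, d)).2
      = d + (cs.filter (fun c => decide (String.ofList [c] ∈ no_dias))).length := by
  induction cs with
  | nil => intro s d; simp [buildVariant]
  | cons c cs ih =>
    intro s d
    by_cases hc : String.ofList [c] ∈ no_dias
    · simp only [buildVariant, List.foldl_cons, bStep] at *
      simp only [List.contains_eq_mem, hc, decide_true, if_true]
      rw [ih]; simp [hc]; omega
    · simp only [buildVariant, List.foldl_cons, bStep] at *
      simp only [List.contains_eq_mem, hc, decide_false]
      rw [ih]; simp [hc]

-- B's inner fold only reads the mask bits d … d + (#diacritic chars of cs) - 1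
theorem buildVariant_congr (dias no_dias : List String) (cs : List Char) (m1 m2 : Nat) :
    ∀ s d, (∀ t, d ≤ t → t < d + (cs.filter (fun c => decide (String.ofList [c] ∈ no_dias))).length →
        m1.testBit t = m2.testBit t) →
      buildVariant dias no_dias cs m1 (s, d) = buildVariant dias no_dias cs m2 (s, d) := by
  induction cs with
  | nil => intro s d _; rfl
  | cons c cs ih =>
    intro s d h
    by_cases hc : String.ofList [c] ∈ no_dias
    · have hd : m1.testBit d = m2.testBit d := by
        apply h d le_rfl
        simp [hc]
      simp only [buildVariant, List.foldl_cons, bStep, List.contains_eq_mem, hc, decide_true,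
        if_true, hd]
      apply ih
      intro t ht1 ht2
      apply h t (by omega)
      simp only [List.filter_cons, hc, decide_true, if_true, List.length_cons]
      omega
    · simp only [buildVariant, List.foldl_cons, bStep, List.contains_eq_mem, hc, decide_false]
      apply ih
      intro t ht1 ht2
      apply h t ht1
      simpa [hc] using ht2

-- A's doubling step, expressed on the explicit double list
theorem mapIdx_double (L : List String) (g h : String → String) :
    (L ++ L).mapIdx (fun j x => if 2 * (j + 1) > (L ++ L).length then h x else g x)
      = L.map g ++ L.map h := by
  apply List.ext_getElem
  · simp
  · intro i hi _
    rw [List.getElem_mapIdx]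
    by_cases hiL : i < L.length
    · rw [List.getElem_append_left hiL, List.getElem_append_left (by simpa using hiL)]
      simp only [List.getElem_map]
      rw [if_neg (by simp; omega)]
    · have hiL' : L.length ≤ i := le_of_not_gt hiL
      have hi2 : i < L.length + L.length := by simpa using hi
      rw [List.getElem_append_right hiL', List.getElem_append_right (by simpa using hiL')]
      simp only [List.length_append, List.getElem_map, List.length_map]
      rw [if_pos (by simp; omega)]

-- main invariant: A's growing list equals B's mask-indexed enumeration, for every prefix
theorem insert_dia_main (dias no_dias : List String) (cs : List Char) :
    cs.foldl (aStep dias no_dias) [""]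
      = (List.range (2 ^ (cs.filter (fun c => no_dias.contains (String.ofList [c]))).length)).map
          (fun mask => (buildVariant dias no_dias cs mask ("", 0)).1) := by
  induction cs using List.reverseRecOn with
  | nil => simp [buildVariant]
  | append_singleton ts c ih =>
    rw [List.foldl_concat, ih]
    simp only [List.contains_eq_mem]
    have hk : ∀ m : Nat, (buildVariant dias no_dias ts m ("", 0)).2
        = (ts.filter (fun c => decide (String.ofList [c] ∈ no_dias))).length := by
      intro m; simpa using buildVariant_snd dias no_dias ts m "" 0
    generalize hkk : (ts.filter (fun c => decide (String.ofList [c] ∈ no_dias))).length = k at *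
    have hbv : ∀ m, buildVariant dias no_dias (ts ++ [c]) m ("", 0)
        = bStep dias no_dias m (buildVariant dias no_dias ts m ("", 0)) c := by
      intro m; simp [buildVariant]
    by_cases hc : String.ofList [c] ∈ no_dias
    · -- diacritic char: doubling on the left, one more bit on the right
      have hkc : ((ts ++ [c]).filter (fun c => decide (String.ofList [c] ∈ no_dias))).length = k + 1 := by
        simp [List.filter_append, hc, hkk]
      rw [hkc]
      simp only [aStep, List.contains_eq_mem, hc, decide_true, if_true]
      rw [mapIdx_double]
      have hsplit : List.range (2 ^ (k + 1)) = List.range (2 ^ k) ++ (List.range (2 ^ k)).map (fun m => 2 ^ k + m) := by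
        rw [pow_succ, mul_two, List.range_add]
      rw [hsplit, List.map_append]
      simp only [List.map_map]
      congr 1
      · -- first half: bit k clear, plain char appended
        apply List.map_congr_left
        intro m hm
        have hm' : m < 2 ^ k := List.mem_range.mp hm
        simp only [Function.comp, hbv m, bStep, List.contains_eq_mem, hc, decide_true, if_true]
        simp [hk m, Nat.testBit_lt_two_pow hm']
      · -- second half: lower bits unchanged, bit k set, accent appended
        apply List.map_congr_left
        intro m hm
        have hm' : m < 2 ^ k := List.mem_range.mp hm
        have hlow : buildVariant dias no_dias ts (2 ^ k + m) ("", 0)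
            = buildVariant dias no_dias ts m ("", 0) := by
          apply buildVariant_congr
          intro t _ ht2
          exact Nat.testBit_two_pow_add_gt (by omega) m
        have hbit : (2 ^ k + m).testBit k = true := by
          rw [Nat.testBit_two_pow_add_eq, Nat.testBit_lt_two_pow hm']; rfl
        simp only [Function.comp, hbv, bStep, List.contains_eq_mem, hc, decide_true, if_true, hlow]
        simp [hk m, hbit]
    · -- plain char: both sides just append it to every variant
      have hkc : ((ts ++ [c]).filter (fun c => decide (String.ofList [c] ∈ no_dias))).length = k := by
        simp [List.filter_append, hc, hkk]
      rw [hkc]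
      simp only [aStep, List.contains_eq_mem, hc, decide_false, List.map_map]
      apply List.map_congr_left
      intro m _
      simp [Function.comp, hbv m, bStep, hc]

-- ===== VERDICT (by name: the statement is the Claim_ definition above) =====
theorem insert_dia_spec : Claim_equal_insert_dia := by
  intro text dias no_dias _ _
  unfold Spec_insert_dia insert_dia insert_dia_alt
  exact insert_dia_main dias no_dias text.toList
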